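-- pv_equiv track=rewrite | github.com/JHU-CLSP/SciTaRC | get_metrics.py | calculate_robust_depth
-- ===== SOURCE A (Python) =====
-- def calculate_robust_depth(lines):
--     raw_indents = []
--     for line in lines:
--         stripped = line.lstrip()
--         if stripped:
--             raw_indents.append(len(line) - len(stripped))
--
--     if not raw_indents: return 0
--     non_zero_indents = [n for n in raw_indents if n > 0]
--     if not non_zero_indents: return 0
--     indent_unit = min(non_zero_indents)
--     return max(raw // indent_unit for raw in raw_indents)
-- ===== SOURCE B (Python) =====
-- def calculate_robust_depth(lines):
--     max_indent = 0
--     min_pos = None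
--     for line in lines:
--         stripped = line.lstrip()
--         if stripped:
--             indent = len(line) - len(stripped)
--             if indent > max_indent:
--                 max_indent = indent
--             if indent > 0 and (min_pos is None or indent < min_pos):
--                 min_pos = indent
--     return 0 if min_pos is None else max_indent // min_pos
-- ===== Notes on version B (the rewrite author's own statement) =====
-- stated objective: simpler
-- what changed: B replaces A's intermediate indent list, positive-filter list and per-element division under max by a single pass keeping two scalars (running max indent, running min positive indent) and one final division, using that max(raw//u) = max(raw)//u for positive u.
import Mathlib
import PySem

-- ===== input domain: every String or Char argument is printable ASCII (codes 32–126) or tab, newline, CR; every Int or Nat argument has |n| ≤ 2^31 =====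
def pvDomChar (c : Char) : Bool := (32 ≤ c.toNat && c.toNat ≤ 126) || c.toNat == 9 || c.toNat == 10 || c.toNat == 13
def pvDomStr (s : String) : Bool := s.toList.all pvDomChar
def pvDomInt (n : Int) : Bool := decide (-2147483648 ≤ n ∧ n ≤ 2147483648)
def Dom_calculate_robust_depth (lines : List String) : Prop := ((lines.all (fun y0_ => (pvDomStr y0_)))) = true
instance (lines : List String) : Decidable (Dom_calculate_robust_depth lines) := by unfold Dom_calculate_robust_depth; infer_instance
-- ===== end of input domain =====

-- B replaces A's intermediate indent list and per-element division by a single pass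
-- maintaining two scalars (running max indent and min positive indent); objective: simpler.

-- ===== PORT A =====
def calculate_robust_depth (lines : List String) : Int :=
  let raw_indents := lines.foldl (fun acc line =>
    let stripped := PySem.Str.lstrip line
    if stripped ≠ "" then acc ++ [PySem.Str.len line - PySem.Str.len stripped] else acc) []
  if raw_indents = [] then 0
  else
    let non_zero_indents := raw_indents.filter (fun n => n > 0)
    if non_zero_indents = [] then 0
    else
      match PySem.List.min? non_zero_indents (fun y => y) with
      | none => 0  -- unreachable: non_zero_indents ≠ []
      | some indent_unit =>
        match PySem.List.max? (raw_indents.map (fun raw => PySem.Int.floordiv raw indent_unit)) (fun y => y) with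
        | none => 0  -- unreachable: raw_indents ≠ []
        | some m => m

-- ===== PORT B =====
def calculate_robust_depth_alt (lines : List String) : Int :=
  let st := lines.foldl (fun (st : Int × Option Int) line =>
    let stripped := PySem.Str.lstrip line
    if stripped ≠ "" then
      let indent := PySem.Str.len line - PySem.Str.len stripped
      let mx := if indent > st.1 then indent else st.1
      let mn := if indent > 0 && (match st.2 with | none => true | some m => decide (indent < m))
                then some indent else st.2
      (mx, mn)
    else st) (0, none)
  match st.2 with
  | none => 0
  | some min_pos => PySem.Int.floordiv st.1 min_pos

-- ===== PRECONDITION & SPEC =====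
def Spec_calculate_robust_depth (lines : List String) (out : Int) : Prop := out = calculate_robust_depth_alt lines
instance (lines : List String) (out : Int) : Decidable (Spec_calculate_robust_depth lines out) := by unfold Spec_calculate_robust_depth; infer_instance

-- ===== CLAIM (what is proved, stated in full; the proofs are below) =====
def Claim_equal_calculate_robust_depth : Prop := ∀ (lines : List String), Dom_calculate_robust_depth lines → Spec_calculate_robust_depth lines (calculate_robust_depth lines)

-- ===== LEMMAS AND PROOFS =====

-- proof-side helpers: the indent of a non-blank line, and B's scalar step
def pvInd (line : String) : Option Int :=
  if PySem.Str.lstrip line ≠ "" then some (PySem.Str.len line - PySem.Str.len (PySem.Str.lstrip line)) else none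

def pvStep (st : Int × Option Int) (indent : Int) : Int × Option Int :=
  (if indent > st.1 then indent else st.1,
   if indent > 0 && (match st.2 with | none => true | some m => decide (indent < m))
   then some indent else st.2)

theorem pvInd_nonneg (line : String) (x : Int) (h : pvInd line = some x) : 0 ≤ x := by
  unfold pvInd at h
  split at h
  · have hle : PySem.Str.len (PySem.Str.lstrip line) ≤ PySem.Str.len line := by
      simp only [PySem.Str.len_eq, PySem.Str.toList_lstrip, PySem.Chars.lstrip]
      have := List.length_dropWhile_le (p := PySem.Chars.isspace) (l := line.toList)
      simp at *; omega
    simp only [Option.some.injEq] at h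
    omega
  · exact absurd h (by simp)

theorem foldl_append_ind (lines : List String) (acc : List Int) :
    lines.foldl (fun acc l => acc ++ (pvInd l).toList) acc = acc ++ lines.filterMap pvInd := by
  induction lines generalizing acc with
  | nil => simp
  | cons l t ih =>
    rw [List.foldl_cons, List.filterMap_cons, ih]
    cases pvInd l
    · simp
    · simp

theorem foldA (lines : List String) (acc : List Int) :
    lines.foldl (fun acc line =>
      let stripped := PySem.Str.lstrip line
      if stripped ≠ "" then acc ++ [PySem.Str.len line - PySem.Str.len stripped] else acc) acc
    = acc ++ lines.filterMap pvInd := by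
  rw [show (fun (acc : List Int) line =>
      let stripped := PySem.Str.lstrip line
      if stripped ≠ "" then acc ++ [PySem.Str.len line - PySem.Str.len stripped] else acc)
      = fun acc l => acc ++ (pvInd l).toList from by
    funext acc l
    by_cases h : PySem.Str.lstrip l = "" <;> simp [pvInd, h]]
  exact foldl_append_ind lines acc

theorem foldl_pvStep_ind (lines : List String) (st : Int × Option Int) :
    lines.foldl (fun st l => ((pvInd l).map (pvStep st)).getD st) st
    = (lines.filterMap pvInd).foldl pvStep st := by
  induction lines generalizing st with
  | nil => rfl
  | cons l t ih =>
    rw [List.foldl_cons, List.filterMap_cons]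
    cases pvInd l
    · simp [ih]
    · simp [ih]

theorem foldB (lines : List String) (st : Int × Option Int) :
    lines.foldl (fun (st : Int × Option Int) line =>
      let stripped := PySem.Str.lstrip line
      if stripped ≠ "" then
        let indent := PySem.Str.len line - PySem.Str.len stripped
        let mx := if indent > st.1 then indent else st.1
        let mn := if indent > 0 && (match st.2 with | none => true | some m => decide (indent < m))
                  then some indent else st.2
        (mx, mn)
      else st) st
    = (lines.filterMap pvInd).foldl pvStep st := by
  rw [show (fun (st : Int × Option Int) line =>
      let stripped := PySem.Str.lstrip line
      if stripped ≠ "" then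
        let indent := PySem.Str.len line - PySem.Str.len stripped
        let mx := if indent > st.1 then indent else st.1
        let mn := if indent > 0 && (match st.2 with | none => true | some m => decide (indent < m))
                  then some indent else st.2
        (mx, mn)
      else st)
      = fun st l => ((pvInd l).map (pvStep st)).getD st from by
    funext st l
    by_cases h : PySem.Str.lstrip l = "" <;> simp [pvInd, pvStep, h]]
  exact foldl_pvStep_ind lines st

theorem pvStep_fst (rs : List Int) (a : Int) (m : Option Int) :
    (rs.foldl pvStep (a, m)).1 = rs.foldl max a := by
  induction rs generalizing a m with
  | nil => rfl
  | cons r t ih =>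
    simp only [List.foldl_cons, pvStep, ih]
    congr 1
    omega

theorem pvStep_snd_some (rs : List Int) (a m : Int) :
    (rs.foldl pvStep (a, some m)).2 = some ((rs.filter (fun n => n > 0)).foldl min m) := by
  induction rs generalizing a m with
  | nil => rfl
  | cons r t ih =>
    simp only [List.foldl_cons, pvStep, List.filter_cons]
    by_cases hr : 0 < r
    · by_cases hm : r < m <;> simp only [hr, hm] <;> simp [ih] <;> congr 1 <;> omega
    · simp [show ¬ (r > 0) from hr, ih]

theorem pvStep_snd_none (rs : List Int) (a : Int) :
    (rs.foldl pvStep (a, none)).2 =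
      match rs.filter (fun n => n > 0) with
      | [] => none
      | h :: t => some (t.foldl min h) := by
  induction rs generalizing a with
  | nil => rfl
  | cons r t ih =>
    simp only [List.foldl_cons, pvStep, List.filter_cons]
    by_cases hr : 0 < r
    · simp only [hr, decide_true, Bool.true_and]
      simp [pvStep_snd_some]
    · simp [show ¬ (r > 0) from hr, ih]

theorem fd_mono (u a b : Int) (hu : 0 < u) (h : a ≤ b) :
    PySem.Int.floordiv a u ≤ PySem.Int.floordiv b u := by
  rw [PySem.Int.floordiv_eq_ediv_of_pos hu, PySem.Int.floordiv_eq_ediv_of_pos hu]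
  exact Int.ediv_le_ediv hu h

theorem fd_max (u a b : Int) (hu : 0 < u) :
    PySem.Int.floordiv (max a b) u = max (PySem.Int.floordiv a u) (PySem.Int.floordiv b u) := by
  rcases le_total a b with h | h
  · rw [max_eq_right h, max_eq_right (fd_mono u a b hu h)]
  · rw [max_eq_left h, max_eq_left (fd_mono u b a hu h)]

theorem fold_max_div (u : Int) (hu : 0 < u) (t : List Int) (a : Int) :
    (t.map (fun x => PySem.Int.floordiv x u)).foldl max (PySem.Int.floordiv a u)
    = PySem.Int.floordiv (t.foldl max a) u := by
  induction t generalizing a with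
  | nil => rfl
  | cons r s ih => simp only [List.map_cons, List.foldl_cons, ← fd_max u a r hu, ih]

theorem calculate_robust_depth_spec : Claim_equal_calculate_robust_depth := by
  intro lines _
  unfold Spec_calculate_robust_depth calculate_robust_depth calculate_robust_depth_alt
  rw [foldA, foldB]
  simp only [List.nil_append]
  set rs := lines.filterMap pvInd with hrs
  have hnonneg : ∀ x ∈ rs, 0 ≤ x := by
    intro x hx
    rw [hrs, List.mem_filterMap] at hx
    obtain ⟨l, _, hl⟩ := hx
    exact pvInd_nonneg l x hl
  clear_value rs
  cases rs with
  | nil => simp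
  | cons r t =>
    simp only [reduceCtorEq, ite_false]
    rcases hf : (r :: t).filter (fun n => n > 0) with _ | ⟨h, ht⟩
    · rw [if_pos hf, pvStep_snd_none, hf]
    · have hne : (r :: t).filter (fun n => n > 0) ≠ [] := by simp [hf]
      rw [if_neg hne, hf, PySem.List.min?_id_cons, pvStep_snd_none, hf, pvStep_fst]
      have hu : 0 < ht.foldl min h := by
        have hmem : ht.foldl min h ∈ (r :: t).filter (fun n => n > 0) := by
          rw [hf]
          exact PySem.List.min?_mem (xs := h :: ht) (key := fun y => y) (m := ht.foldl min h)
            (by rw [PySem.List.min?_id_cons])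
        rw [List.mem_filter] at hmem
        simpa using hmem.2
      show (match PySem.List.max? (List.map (fun raw => PySem.Int.floordiv raw (ht.foldl min h)) (r :: t)) (fun y => y) with
            | none => 0 | some m => m)
          = PySem.Int.floordiv ((r :: t).foldl max 0) (ht.foldl min h)
      rw [List.map_cons, PySem.List.max?_id_cons, fold_max_div _ hu]
      have hr0 : 0 ≤ r := hnonneg r (by simp)
      rw [List.foldl_cons, max_comm, max_eq_left hr0]
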